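-- pv_equiv track=rewrite | github.com/alinghi/PracticeAlgorithm | baekjoon/17140.py | transform
-- ===== SOURCE A (Python) =====
-- def transform(given_list):
--     d,dd,ddd={},[],[]
--     for i in given_list:
--         if i not in d:
--             d[i]=1
--         else:
--             d[i]+=1
--     for k in d.items():
--         dd.append(k)
--     dd.sort(key=lambda x:(x[1],x[0]))
--     for k in dd:
--         if k[0]!=0:
--             ddd.append(k[0])
--             ddd.append(k[1])
--     return ddd
-- ===== SOURCE B (Python) =====
-- def transform(given_list):
--     s = sorted(given_list)
--     pairs = []
--     for x in s:
--         if pairs and pairs[-1][0] == x: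
--             pairs[-1] = (x, pairs[-1][1] + 1)
--         else:
--             pairs.append((x, 1))
--     pairs.sort(key=lambda p: (p[1], p[0]))
--     return [y for v, c in pairs if v != 0 for y in (v, c)]
-- ===== Notes on version B (the rewrite author's own statement) =====
-- stated objective: alternative
-- what changed: Counts are derived by sorting the input once and run-length encoding the maximal runs, instead of A's dict-based counting loop; the resulting (value,count) pairs are then sorted by (count,value) and flattened by a comprehension.
import Mathlib
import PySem

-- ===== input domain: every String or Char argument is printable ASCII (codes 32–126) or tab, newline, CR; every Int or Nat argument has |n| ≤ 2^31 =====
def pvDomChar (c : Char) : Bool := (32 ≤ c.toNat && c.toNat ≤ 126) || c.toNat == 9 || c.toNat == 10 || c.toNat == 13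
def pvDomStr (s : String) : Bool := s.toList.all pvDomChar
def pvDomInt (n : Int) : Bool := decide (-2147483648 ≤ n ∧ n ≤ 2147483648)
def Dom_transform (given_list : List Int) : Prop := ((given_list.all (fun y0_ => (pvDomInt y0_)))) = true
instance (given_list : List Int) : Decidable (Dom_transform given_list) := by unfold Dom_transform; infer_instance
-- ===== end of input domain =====

-- B replaces A's dict-counting loop by sort + run-length encoding of maximal runs (alternative decomposition, same results; A's in-place sort of its local list is not observable).

-- ===== PORT A =====
def transform (given_list : List Int) : List Int :=
  let d : PySem.Dict Int Int := given_list.foldl (fun d i =>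
    if d.contains i = false then d.insert i 1
    else d.insert i (d.getD i 0 + 1)) PySem.Dict.empty
  let dd : List (Int × Int) := d.items.foldl (fun dd k => dd ++ [k]) []
  let dd := PySem.List.sorted2 dd (fun x => x.2) (fun x => x.1)
  dd.foldl (fun ddd k => if k.1 ≠ 0 then ddd ++ [k.1, k.2] else ddd) []

-- ===== PORT B =====
-- one step of the run-length loop; the accumulator is Source B's `pairs` in reverse
-- (Python updates pairs[-1]; the port updates the head of the reversed list)
def rleStep (acc : List (Int × Int)) (x : Int) : List (Int × Int) :=
  match acc with
  | (v, c) :: rest => if v = x then (x, c + 1) :: rest else (x, 1) :: (v, c) :: rest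
  | [] => [(x, 1)]

def transform_alt (given_list : List Int) : List Int :=
  let s := PySem.List.sorted given_list (fun x => x)
  let pairs := (s.foldl rleStep []).reverse
  let pairs := PySem.List.sorted2 pairs (fun p => p.2) (fun p => p.1)
  pairs.flatMap (fun p => if p.1 ≠ 0 then [p.1, p.2] else [])

-- ===== PRECONDITION & SPEC =====
def Spec_transform (given_list : List Int) (out : List Int) : Prop := out = transform_alt given_list
instance (given_list : List Int) (out : List Int) : Decidable (Spec_transform given_list out) := by unfold Spec_transform; infer_instance

-- ===== CLAIM (what is proved, stated in full; the proofs are below) =====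
def Claim_equal_transform : Prop := ∀ (given_list : List Int), Dom_transform given_list → Spec_transform given_list (transform given_list)

-- ===== LEMMAS AND PROOFS =====

-- appending one by one is appending
theorem foldl_append_one (l : List (Int × Int)) (acc : List (Int × Int)) :
    l.foldl (fun a k => a ++ [k]) acc = acc ++ l := by
  induction l generalizing acc with
  | nil => simp
  | cons x t ih => simp [List.foldl, ih, List.append_assoc]

-- A's counting loop is Counter
theorem countFold_eq_counter (xs : List Int) :
    xs.foldl (fun d i =>
      if d.contains i = false then d.insert i 1
      else d.insert i (d.getD i 0 + 1)) (PySem.Dict.empty : PySem.Dict Int Int)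
    = PySem.Dict.counter xs := by
  have hf : (fun (d : PySem.Dict Int Int) i =>
      if d.contains i = false then d.insert i 1
      else d.insert i (d.getD i 0 + 1))
      = fun d x => d.insert x (d.getD x 0 + 1) := by
    funext d i
    by_cases h : d.contains i = false
    · have h0 : d.get? i = none := (PySem.Dict.get?_eq_none_iff_contains d i).2 h
      simp [h, PySem.Dict.getD, h0]
    · simp [h]
  rw [hf, PySem.Dict.foldl_insert_getD_add_one_eq_counter]

-- sorted2 is sorted with the lexicographic pair key
theorem sorted2_eq_sorted_lex {α : Type} (xs : List α) (k1 k2 : α → Int) :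
    PySem.List.sorted2 xs k1 k2 = PySem.List.sorted xs (fun a => toLex (k1 a, k2 a)) := by
  show List.foldl _ [] xs = List.foldl _ [] xs
  have : (fun a b => decide (k1 a < k1 b) || (!decide (k1 b < k1 a) && decide (k2 a < k2 b)))
      = (fun a b => decide (toLex (k1 a, k2 a) < toLex (k1 b, k2 b))) := by
    funext a b
    by_cases h1 : k1 a < k1 b <;> by_cases h2 : k1 b < k1 a <;> by_cases h3 : k2 a < k2 b <;>
      simp [Prod.Lex.lt_iff, h1, h2, h3] <;> omega
  rw [this]

-- the loop only ever modifies the nonempty front part of the accumulator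
theorem foldl_rleStep_append (t : List Int) (a b : List (Int × Int)) (ha : a ≠ []) :
    t.foldl rleStep (a ++ b) = t.foldl rleStep a ++ b := by
  induction t generalizing a with
  | nil => rfl
  | cons y t' ih =>
    match a, ha with
    | (v, c) :: a', _ =>
      by_cases h : v = y
      · simpa [List.foldl, rleStep, h] using ih ((y, c + 1) :: a') (by simp)
      · simpa [List.foldl, rleStep, h] using ih ((y, 1) :: (v, c) :: a') (by simp)

-- a head entry whose value does not occur in the rest of the input stays behind the new entries
theorem foldl_rleStep_shift (t : List Int) (x : Int) (c : Int) (rest : List (Int × Int))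
    (hx : x ∉ t) :
    t.foldl rleStep ((x, c) :: rest) = t.foldl rleStep [] ++ (x, c) :: rest := by
  match t with
  | [] => rfl
  | y :: t' =>
    have hxy : x ≠ y := by intro h; exact hx (by simp [h])
    have h1 : rleStep ((x, c) :: rest) y = [(y, 1)] ++ (x, c) :: rest := by
      simp [rleStep, hxy]
    show List.foldl rleStep (rleStep ((x, c) :: rest) y) t' = _
    rw [h1, foldl_rleStep_append t' [(y, 1)] ((x, c) :: rest) (by simp)]
    rfl

-- main invariant of the run-length loop on a sorted list
theorem rle_main (t : List Int) (x : Int) (c : Int)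
    (hs : (x :: t).Pairwise (· ≤ ·)) :
    ∃ r : List (Int × Int),
      t.foldl rleStep [(x, c)] = r ++ [(x, c + t.count x)] ∧
      (r.map Prod.fst).Nodup ∧
      (∀ q, q ∈ r.map Prod.fst ↔ q ∈ t ∧ q ≠ x) ∧
      (∀ p ∈ r, p.2 = t.count p.1) ∧
      x ∉ r.map Prod.fst := by
  induction t generalizing x c with
  | nil => exact ⟨[], by simp, by simp, by simp, by simp, by simp⟩
  | cons y t' ih =>
    have hxy : x ≤ y := (List.pairwise_cons.1 hs).1 y (by simp)
    have hs' : (y :: t').Pairwise (· ≤ ·) := (List.pairwise_cons.1 hs).2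
    by_cases hxe : y = x
    · subst hxe
      have hstep : (y :: t').foldl rleStep [(y, c)] = t'.foldl rleStep [(y, c + 1)] := by
        simp [List.foldl, rleStep]
      obtain ⟨r, h1, h2, h3, h4, h5⟩ := ih y (c + 1) hs'
      refine ⟨r, ?_, h2, ?_, ?_, h5⟩
      · rw [hstep, h1]
        have : c + 1 + (t'.count y : Int) = c + ((y :: t').count y : Int) := by
          simp [List.count_cons]; omega
        rw [this]
      · intro q
        rw [h3 q]
        constructor
        · rintro ⟨hq, hne⟩; exact ⟨List.mem_cons_of_mem _ hq, hne⟩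
        · rintro ⟨hq, hne⟩
          rcases List.mem_cons.1 hq with h | h
          · exact absurd h hne
          · exact ⟨h, hne⟩
      · intro p hp
        rw [h4 p hp]
        have hne : p.1 ≠ y := ((h3 p.1).1 (List.mem_map_of_mem hp)).2
        simp [List.count_cons, Ne.symm hne]
    · have hxlt : x < y := lt_of_le_of_ne hxy (fun h => hxe h.symm)
      have hxnot : x ∉ y :: t' := by
        intro hmem
        rcases List.mem_cons.1 hmem with h | h
        · omega
        · have : y ≤ x := (List.pairwise_cons.1 hs').1 x h
          omega
      have hxnt' : x ∉ t' := fun h => hxnot (List.mem_cons_of_mem _ h)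
      rw [foldl_rleStep_shift _ x c [] hxnot]
      have hinit : (y :: t').foldl rleStep ([] : List (Int × Int)) = t'.foldl rleStep [(y, 1)] := by
        simp [List.foldl, rleStep]
      obtain ⟨r', h1, h2, h3, h4, h5⟩ := ih y 1 hs'
      have hcx : ((y :: t').count x : Int) = 0 := by
        rw [List.count_eq_zero.mpr hxnot]
        rfl
      refine ⟨r' ++ [(y, 1 + (t'.count y : Int))], ?_, ?_, ?_, ?_, ?_⟩
      · rw [hinit, h1, hcx]
        simp
      · simp only [List.map_append, List.map_cons, List.map_nil]
        exact List.Nodup.append h2 (by simp)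
          (fun a ha hb => by rw [List.mem_singleton] at hb; exact h5 (hb ▸ ha))
      · intro q
        simp only [List.map_append, List.map_cons, List.map_nil, List.mem_append,
          List.mem_singleton, h3 q]
        constructor
        · rintro (⟨hq, hne⟩ | rfl)
          · refine ⟨List.mem_cons_of_mem _ hq, fun h => hxnt' (h ▸ hq)⟩
          · exact ⟨List.mem_cons_self, fun h => hxe h⟩
        · rintro ⟨hq, hne⟩
          rcases List.mem_cons.1 hq with h | h
          · exact Or.inr h
          · by_cases hqy : q = y
            · exact Or.inr hqy
            · exact Or.inl ⟨h, hqy⟩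
      · intro p hp
        rcases List.mem_append.1 hp with h | h
        · have hne : p.1 ≠ y := fun hh => h5 (hh ▸ List.mem_map_of_mem h)
          rw [h4 p h]
          simp [List.count_cons, Ne.symm hne]
        · rcases List.mem_singleton.1 h with rfl
          simp [List.count_cons]
          omega
      · simp only [List.map_append, List.map_cons, List.map_nil, List.mem_append,
          List.mem_singleton]
        rintro (h | rfl)
        · exact hxnt' ((h3 x).1 h).1
        · exact hxe rfl

-- characterisation of the raw run-length result
theorem rle_char (s : List Int) (hs : s.Pairwise (· ≤ ·)) :
    ((s.foldl rleStep []).map Prod.fst).Nodup ∧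
    (∀ q, q ∈ (s.foldl rleStep []).map Prod.fst ↔ q ∈ s) ∧
    (∀ p ∈ s.foldl rleStep [], p.2 = s.count p.1) := by
  match s with
  | [] => exact ⟨by simp, by simp, by simp⟩
  | x :: t =>
    have hstart : (x :: t).foldl rleStep ([] : List (Int × Int)) = t.foldl rleStep [(x, 1)] := by
      simp [List.foldl, rleStep]
    obtain ⟨r, h1, h2, h3, h4, h5⟩ := rle_main t x 1 hs
    rw [hstart, h1]
    refine ⟨?_, ?_, ?_⟩
    · simp only [List.map_append, List.map_cons, List.map_nil]
      exact List.Nodup.append h2 (by simp)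
        (fun a ha hb => by rw [List.mem_singleton] at hb; exact h5 (hb ▸ ha))
    · intro q
      simp only [List.map_append, List.map_cons, List.map_nil, List.mem_append,
        List.mem_singleton, List.not_mem_nil, or_false, h3 q, List.mem_cons]
      constructor
      · rintro (⟨hq, _⟩ | rfl)
        · exact Or.inr hq
        · exact Or.inl rfl
      · rintro (rfl | hq)
        · exact Or.inr rfl
        · by_cases hqx : q = x
          · exact Or.inr hqx
          · exact Or.inl ⟨hq, hqx⟩
    · intro p hp
      rcases List.mem_append.1 hp with h | h
      · have hne : p.1 ≠ x := ((h3 p.1).1 (List.mem_map_of_mem h)).2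
        rw [h4 p h]
        simp [List.count_cons, Ne.symm hne]
      · rcases List.mem_singleton.1 h with rfl
        simp [List.count_cons]
        omega

-- B's pair list is a permutation of Counter(xs).items()
theorem rle_perm_counter (xs : List Int) :
    (((PySem.List.sorted xs (fun x => x)).foldl rleStep []).reverse).Perm
      ((PySem.Set.ofList xs).map (fun k => (k, (xs.count k : Int)))) := by
  have hperm : (PySem.List.sorted xs (fun x => x)).Perm xs := PySem.List.sorted_perm xs _ false
  have hsorted : (PySem.List.sorted xs (fun x => x)).Pairwise (· ≤ ·) :=
    PySem.List.sorted_pairwise xs (fun x => x)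
  obtain ⟨hnd, hmem, hcnt⟩ := rle_char _ hsorted
  have hR : ((PySem.List.sorted xs (fun x => x)).foldl rleStep [])
      = (((PySem.List.sorted xs (fun x => x)).foldl rleStep []).map Prod.fst).map
          (fun k => (k, (xs.count k : Int))) := by
    rw [List.map_map]
    have := List.map_congr_left (l := (PySem.List.sorted xs (fun x => x)).foldl rleStep [])
      (f := fun p : Int × Int => ((fun k => (k, (xs.count k : Int))) ∘ Prod.fst) p) (g := id) ?_
    · rw [this, List.map_id]
    · intro p hp
      have := hcnt p hp
      have hc : (PySem.List.sorted xs (fun x => x)).count p.1 = xs.count p.1 := hperm.count_eq p.1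
      simp only [Function.comp, id]
      rw [← hc, ← this]
  have hkeys : (((PySem.List.sorted xs (fun x => x)).foldl rleStep []).map Prod.fst).Perm
      (PySem.Set.ofList xs) := by
    rw [List.perm_ext_iff_of_nodup hnd (PySem.Set.nodup_ofList xs)]
    intro q
    rw [hmem q, PySem.Set.mem_ofList, hperm.mem_iff]
  have h1 := List.reverse_perm ((PySem.List.sorted xs (fun x => x)).foldl rleStep [])
  have h2 := hkeys.map (fun k => (k, (xs.count k : Int)))
  exact h1.trans (hR.symm ▸ h2)

-- flattening loop = comprehension
theorem foldl_flatten (l : List (Int × Int)) (acc : List Int) :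
    l.foldl (fun ddd k => if k.1 ≠ 0 then ddd ++ [k.1, k.2] else ddd) acc
      = acc ++ l.flatMap (fun p => if p.1 ≠ 0 then [p.1, p.2] else []) := by
  induction l generalizing acc with
  | nil => simp
  | cons p t ih =>
    rw [List.foldl_cons, ih]
    by_cases h : p.1 = 0 <;> simp [h, List.append_assoc]

-- ===== VERDICT (by name: the statement is the Claim_ definition above) =====
theorem transform_spec : Claim_equal_transform := by
  intro xs _
  show transform xs = transform_alt xs
  simp only [transform, transform_alt]
  rw [countFold_eq_counter, foldl_append_one, PySem.Dict.items_counter]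
  simp only [List.nil_append]
  rw [sorted2_eq_sorted_lex, sorted2_eq_sorted_lex]
  have hinj : Function.Injective (fun p : Int × Int => toLex (p.2, p.1)) := by
    intro ⟨a, b⟩ ⟨c, d⟩ h
    have h2 := toLex.injective h
    simp only [Prod.mk.injEq] at h2 ⊢
    exact ⟨h2.2, h2.1⟩
  rw [PySem.List.sorted_eq_sorted_of_perm _ _ _ hinj ((rle_perm_counter xs).symm)]
  rw [foldl_flatten]
  simp
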